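-- pv_equiv track=rewrite | github.com/gayeon7877/codingtestPython | 프로그래머스/4/42891. 무지의 먹방 라이브/무지의 먹방 라이브.py | solution
-- ===== SOURCE A (Python) =====
-- import heapq
--
-- def solution(food_times, k):
--     answer = 0
--
--     if sum(food_times)<=k:
--         return -1
--
--     q=[]
--     for i in range(len(food_times)):
--         #음식을 먹는데 걸리는 시간, 음식 번호
--         heapq.heappush(q,(food_times[i],i+1))
--
--
--     sum_value=0
--     length=len(food_times)
--     previous=0
--     while sum_value+(q[0][0]-previous)*length<=k:
--         now=heapq.heappop(q)[0]
--         sum_value+=(now-previous)*length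
--         length-=1
--         previous=now
--
--     result=sorted(q,key= lambda x:x[1])
--     return result[(k-sum_value)%length][1]
-- ===== SOURCE B (Python) =====
-- def solution(food_times, k):
--     # Binary search on the "layer time" v: cost(v) = sum(min(t, v)) is the time
--     # spent once every food has been eaten for at most v seconds.  Find the
--     # largest v with cost(v) <= k; survivors are the foods with t > v, already
--     # in original-index order, and the answer is survivors[(k - cost(v)) % len].
--     if sum(food_times) <= k:
--         return -1
--     n = len(food_times)
--
--     def cost(v):
--         return sum(min(t, v) for t in food_times)
--
--     lo = k // n                # cost(lo) <= n*lo <= k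
--     hi = max(food_times)       # cost(hi) = sum(food_times) > k
--     while lo + 1 < hi:
--         mid = (lo + hi) // 2
--         if cost(mid) <= k:
--             lo = mid
--         else:
--             hi = mid
--     consumed = cost(lo)
--     survivors = [i + 1 for i, t in enumerate(food_times) if t > lo]
--     return survivors[(k - consumed) % len(survivors)]
-- ===== Notes on version B (the rewrite author's own statement) =====
-- stated objective: alternative
-- what changed: Replaces the heap simulation (heappush all foods, repeatedly pop the minimum accumulating layer deltas) by a binary search on the layer time v over the monotone cost function cost(v)=sum(min(t,v)); the fully-eaten foods are then those with t<=v, the survivors are read off in original order with no sorting or heap at all, and the answer is survivors[(k-cost(v)) % len(survivors)].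
import Mathlib
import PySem

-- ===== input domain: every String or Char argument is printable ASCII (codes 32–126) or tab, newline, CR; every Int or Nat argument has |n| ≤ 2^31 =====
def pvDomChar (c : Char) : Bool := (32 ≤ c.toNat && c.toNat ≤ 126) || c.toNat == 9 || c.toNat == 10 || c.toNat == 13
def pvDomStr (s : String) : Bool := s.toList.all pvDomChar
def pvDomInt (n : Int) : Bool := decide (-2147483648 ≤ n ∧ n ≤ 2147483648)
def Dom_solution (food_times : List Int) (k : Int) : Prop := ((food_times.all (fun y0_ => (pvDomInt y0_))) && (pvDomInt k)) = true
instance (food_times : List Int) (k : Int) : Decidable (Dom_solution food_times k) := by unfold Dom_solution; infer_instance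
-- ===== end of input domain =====

-- B replaces A's heap-pop simulation by a binary search on the layer time v with cost(v) = sum(min(t,v)); objective: alternative (no heap, no sort).


-- ===== PORT A =====
-- Python tuple comparison (t1,i1) < (t2,i2), used by the heap ordering.
def lexLt (a b : Int × Int) : Bool := a.1 < b.1 || (a.1 == b.1 && a.2 < b.2)

-- heapq modeled as an ordered list: heappush = ordered insert, heappop = take the head.
-- Exact here: tuple comparison is a strict total order on the pushed pairs (their second
-- components are distinct), so the pop order (always the unique minimum) and the final
-- multiset of q — the only observables A uses — are exactly those of Python's binary heap.
def heappushA (q : List (Int × Int)) (x : Int × Int) : List (Int × Int) :=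
  PySem.List.insertBy lexLt x q

-- the while loop: state (q, sum_value, length, previous); [] = Python IndexError on q[0] (unreachable when Pre_ holds)
def loopA (k : Int) : List (Int × Int) → Int → Int → Int → (List (Int × Int) × Int × Int)
  | [], sumv, len, _ => ([], sumv, len)
  | (t, i) :: rest, sumv, len, prev =>
      if sumv + (t - prev) * len ≤ k then
        loopA k rest (sumv + (t - prev) * len) (len - 1) t
      else ((t, i) :: rest, sumv, len)

def solution (food_times : List Int) (k : Int) : Int :=
  if food_times.sum ≤ k then -1
  else
    let q := food_times.zipIdx.foldl (fun acc x => heappushA acc (x.1, (x.2 : Int) + 1)) []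
    let st := loopA k q 0 (food_times.length : Int) 0
    let res := PySem.List.sorted st.1 (fun x => x.2) false
    -- result[(k - sum_value) % length][1]; the index is always in range when Pre_ holds
    (((PySem.List.pyGet? res (PySem.Int.mod (k - st.2.1) st.2.2)).map Prod.snd).getD 0)

-- ===== PORT B =====
-- cost(v) = sum(min(t, v) for t in food_times)
def costf (food_times : List Int) (v : Int) : Int := (food_times.map (fun t => min t v)).sum

-- while lo + 1 < hi: mid = (lo+hi)//2; if cost(mid) <= k: lo = mid else hi = mid
-- (fuel = the initial gap, a totality guard only: the gap shrinks by ≥ 1 each step)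
def bsearchGo (food_times : List Int) (k : Int) : Nat → Int → Int → Int
  | 0, lo, _ => lo
  | fuel + 1, lo, hi =>
    if lo + 1 < hi then
      let mid := PySem.Int.floordiv (lo + hi) 2
      if costf food_times mid ≤ k then bsearchGo food_times k fuel mid hi
      else bsearchGo food_times k fuel lo mid
    else lo

def bsearchB (food_times : List Int) (k lo hi : Int) : Int :=
  bsearchGo food_times k (hi - lo).toNat lo hi

def solution_alt (food_times : List Int) (k : Int) : Int :=
  if food_times.sum ≤ k then -1
  else
    let n : Int := food_times.length
    let lo := PySem.Int.floordiv k n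
    -- max(food_times): raises on [] — those inputs are outside Pre_ (A raises there too)
    let hi := (PySem.List.max? food_times (fun x => x)).getD 0
    let v := bsearchB food_times k lo hi
    let consumed := costf food_times v
    let survivors := ((PySem.List.enumerate food_times 0).filter (fun x => decide (v < x.2))).map
      (fun x => x.1 + 1)
    ((PySem.List.pyGet? survivors (PySem.Int.mod (k - consumed) (survivors.length : Int))).getD 0)

-- ===== PRECONDITION & SPEC =====
-- Pre_ excludes only food_times = [] with k < 0, where Python A raises IndexError on q[0]
-- (B raises ValueError on max([]) there too).
def Pre_solution (food_times : List Int) (k : Int) : Prop := food_times = [] → 0 ≤ k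
instance (food_times : List Int) (k : Int) : Decidable (Pre_solution food_times k) := by
  unfold Pre_solution; infer_instance

def pvWitness_solution : List Int × Int := ([3, 1, 2], 5)

def Spec_solution (food_times : List Int) (k : Int) (out : Int) : Prop := out = solution_alt food_times k
instance (food_times : List Int) (k : Int) (out : Int) : Decidable (Spec_solution food_times k out) := by
  unfold Spec_solution; infer_instance

-- ===== CLAIM (what is proved, stated in full; the proofs are below) =====
def Claim_equal_solution : Prop := ∀ (food_times : List Int) (k : Int), Dom_solution food_times k → Pre_solution food_times k → Spec_solution food_times k (solution food_times k)

-- ===== LEMMAS AND PROOFS =====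

-- the list of "completion costs": entry j is the total time at which the j-th popped food is finished
def costsL : Int → Int → List (Int × Int) → List Int
  | _, _, [] => []
  | acc, len, (t, _) :: r => (acc + len * t) :: costsL (acc + t) (len - 1) r

theorem costsL_length : ∀ (s : List (Int × Int)) (acc len : Int),
    (costsL acc len s).length = s.length := by
  intro s
  induction s with
  | nil => intro acc len; simp [costsL]
  | cons hd r ih => intro acc len; obtain ⟨t, i⟩ := hd; simp [costsL, ih]

theorem loopA_eq (k : Int) : ∀ (s : List (Int × Int)) (acc len prev : Int),
    loopA k s (acc + len * prev) len prev =
      (s.drop ((costsL acc len s).takeWhile (fun c => c ≤ k)).length,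
       ((costsL acc len s).take ((costsL acc len s).takeWhile (fun c => c ≤ k)).length).getLastD
         (acc + len * prev),
       len - ((costsL acc len s).takeWhile (fun c => c ≤ k)).length) := by
  intro s
  induction s with
  | nil => intro acc len prev; simp [loopA, costsL]
  | cons hd r ih =>
    intro acc len prev
    obtain ⟨t, i⟩ := hd
    have hsum : acc + len * prev + (t - prev) * len = acc + len * t := by ring
    by_cases h : acc + len * t ≤ k
    · have ih' := ih (acc + t) (len - 1) t
      have hs : acc + t + (len - 1) * t = acc + len * t := by ring
      rw [hs] at ih'
      simp only [loopA, hsum, costsL, List.takeWhile_cons, decide_eq_true_eq,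
        h, if_true, List.length_cons, List.drop_succ_cons, List.take_succ_cons,
        List.getLastD_cons]
      rw [ih']
      simp only [Prod.mk.injEq]
      refine ⟨by trivial, by trivial, ?_⟩
      push_cast
      ring
    · simp only [loopA, hsum, costsL, List.takeWhile_cons, decide_eq_true_eq,
        h, if_false, List.length_nil, List.drop_zero, List.take_zero, List.getLastD_nil]
      simp

theorem costsL_getElem : ∀ (s : List (Int × Int)) (j : Nat) (hj : j < s.length) (acc len : Int),
    (costsL acc len s)[j]'(by rw [costsL_length]; exact hj) =
      acc + ((s.take j).map Prod.fst).sum + (len - j) * (s[j].1) := by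
  intro s
  induction s with
  | nil => intro j hj; simp at hj
  | cons hd r ih =>
    intro j hj acc len
    obtain ⟨t, i⟩ := hd
    cases j with
    | zero => simp [costsL]
    | succ j' =>
      have hj' : j' < r.length := by simpa using hj
      simp only [costsL, List.getElem_cons_succ, List.take_succ_cons, List.map_cons,
        List.sum_cons]
      rw [ih j' hj' (acc + t) (len - 1)]
      push_cast
      ring_nf

theorem take_getLastD : ∀ (cs : List Int) (d : Nat) (x : Int), d ≤ cs.length →
    (cs.take d).getLastD x = if d = 0 then x else cs.getD (d - 1) x := by
  intro cs
  induction cs with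
  | nil => intro d x h; simp at h; simp [h]
  | cons c r ih =>
    intro d x h
    cases d with
    | zero => simp
    | succ d' =>
      simp only [List.take_succ_cons, List.getLastD_cons]
      rw [ih d' c (by simpa using h)]
      cases d' with
      | zero => simp
      | succ d'' =>
        have hlt : d'' < r.length := by simpa using h
        simp only [Nat.succ_ne_zero, if_false, Nat.add_sub_cancel, List.getD_cons_succ]
        rw [List.getD_eq_getElem r c hlt, List.getD_eq_getElem r x hlt]

theorem insertBy_pairwise_fst (x : Int × Int) :
    ∀ (acc : List (Int × Int)), acc.Pairwise (fun a b => a.1 ≤ b.1) →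
      (PySem.List.insertBy lexLt x acc).Pairwise (fun a b => a.1 ≤ b.1) := by
  intro acc
  induction acc with
  | nil => intro _; simp [PySem.List.insertBy]
  | cons y ys ih =>
    intro h
    by_cases hb : lexLt x y
    · rw [show PySem.List.insertBy lexLt x (y :: ys) = x :: y :: ys from by
        simp [PySem.List.insertBy, hb]]
      have hxy : x.1 ≤ y.1 := by
        simp only [lexLt, Bool.or_eq_true, Bool.and_eq_true, decide_eq_true_eq, beq_iff_eq] at hb
        omega
      constructor
      · intro z hz
        rcases List.mem_cons.mp hz with rfl | hz
        · exact hxy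
        · exact le_trans hxy ((List.pairwise_cons.mp h).1 z hz)
      · exact h
    · rw [show PySem.List.insertBy lexLt x (y :: ys) = y :: PySem.List.insertBy lexLt x ys from by
        simp [PySem.List.insertBy, hb]]
      have hyx : y.1 ≤ x.1 := by
        simp only [lexLt, Bool.or_eq_true, Bool.and_eq_true, decide_eq_true_eq, beq_iff_eq] at hb
        omega
      constructor
      · intro z hz
        rw [PySem.List.mem_insertBy] at hz
        rcases hz with rfl | hzz
        · exact hyx
        · exact (List.pairwise_cons.mp h).1 z hzz
      · exact ih (List.pairwise_cons.mp h).2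

theorem lexLt_eq :
    (fun a b : Int × Int => (decide (a.1 < b.1) || (!decide (b.1 < a.1) && decide (a.2 < b.2)))) = lexLt := by
  funext a b
  rw [Bool.eq_iff_iff]
  simp only [lexLt, Bool.or_eq_true, Bool.and_eq_true, Bool.not_eq_true',
    decide_eq_true_eq, decide_eq_false_iff_not, beq_iff_eq]
  omega

theorem foldl_insert_pairwise : ∀ (l : List (Int × Int)) (init : List (Int × Int)),
    init.Pairwise (fun a b => a.1 ≤ b.1) →
    (l.foldl (fun acc x => PySem.List.insertBy lexLt x acc) init).Pairwise (fun a b => a.1 ≤ b.1) := by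
  intro l
  induction l with
  | nil => intro init h; simpa using h
  | cons hd tl ih =>
    intro init h
    simp only [List.foldl_cons]
    exact ih _ (insertBy_pairwise_fst hd init h)

theorem sorted2_as_foldl (l : List (Int × Int)) :
    PySem.List.sorted2 l (fun x => x.1) (fun x => x.2) false =
      l.foldl (fun acc x => PySem.List.insertBy lexLt x acc) [] := by
  simp only [PySem.List.sorted2, if_neg (by simp : ¬ (false = true))]
  rw [lexLt_eq]

theorem buildA_eq (ft : List Int) :
    ft.zipIdx.foldl (fun acc x => heappushA acc (x.1, (x.2 : Int) + 1)) [] =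
      PySem.List.sorted2 (ft.zipIdx.map (fun x => (x.1, (x.2 : Int) + 1)))
        (fun x => x.1) (fun x => x.2) false := by
  rw [sorted2_as_foldl, List.foldl_map]
  rfl

theorem pyGet?_map_snd (l : List (Int × Int)) (i : Int) :
    PySem.List.pyGet? (l.map Prod.snd) i = (PySem.List.pyGet? l i).map Prod.snd := by
  simp only [PySem.List.pyGet?, List.length_map]
  cases hx : PySem.List.pyIdx? l.length i <;> simp [List.getElem?_map]

theorem sorted_map_snd (xs : List (Int × Int)) :
    (PySem.List.sorted xs (fun x => x.2) false).map Prod.snd =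
      PySem.List.sorted (xs.map Prod.snd) (fun x => x) false := by
  refine PySem.List.eq_of_perm_of_pairwise_le_of_injective (fun x : Int => x)
    (fun a b h => h) ?_ ?_ ?_
  · exact ((PySem.List.sorted_perm xs (fun x => x.2) false).map Prod.snd).trans
      (PySem.List.sorted_perm (xs.map Prod.snd) (fun x => x) false).symm
  · exact List.pairwise_map.mpr (PySem.List.sorted_pairwise xs (fun x => x.2))
  · exact PySem.List.sorted_pairwise (xs.map Prod.snd) (fun x => x)

-- monotonicity of the layer cost
theorem costS_mono (s : List (Int × Int)) {v w : Int} (h : v ≤ w) :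
    (s.map (fun p => min p.1 v)).sum ≤ (s.map (fun p => min p.1 w)).sum :=
  List.sum_le_sum (fun p _ => min_le_min (le_refl p.1) h)

theorem costS_le (s : List (Int × Int)) (v : Int) :
    (s.map (fun p => min p.1 v)).sum ≤ (s.length : Int) * v := by
  calc (s.map (fun p => min p.1 v)).sum ≤ (s.map (fun _ => v)).sum :=
        List.sum_le_sum (fun p _ => min_le_right p.1 v)
    _ = (s.length : Int) * v := PySem.List.sum_map_const_int s v

-- pairwise fst order read off at indices
theorem pairwise_fst_getElem (s : List (Int × Int)) (hs : s.Pairwise (fun a b => a.1 ≤ b.1))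
    {i j : Nat} (hi : i < s.length) (hj : j < s.length) (hij : i ≤ j) :
    s[i].1 ≤ s[j].1 := by
  rcases Nat.lt_or_ge i j with h | h
  · exact (List.pairwise_iff_getElem.mp hs) i j hi hj h
  · have : i = j := by omega
    subst this; exact le_refl _

-- value of the layer cost at a sorted element
theorem costS_at (s : List (Int × Int)) (hs : s.Pairwise (fun a b => a.1 ≤ b.1))
    (j : Nat) (hj : j < s.length) :
    (s.map (fun p => min p.1 (s[j].1))).sum =
      ((s.take j).map Prod.fst).sum + ((s.length : Int) - j) * s[j].1 := by
  set v := s[j].1 with hv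
  have htk : ∀ p ∈ s.take j, min p.1 v = p.1 := by
    intro p hp
    obtain ⟨i, hi, hpi⟩ := List.getElem_of_mem hp
    have hi' : i < j := by
      have := hi; simp only [List.length_take] at this; omega
    have : (s.take j)[i] = s[i] := List.getElem_take
    rw [this] at hpi
    subst hpi
    exact min_eq_left (pairwise_fst_getElem s hs (by omega) hj (by omega))
  have hdr : ∀ p ∈ s.drop j, min p.1 v = v := by
    intro p hp
    obtain ⟨i, hi, hpi⟩ := List.getElem_of_mem hp
    have : (s.drop j)[i] = s[j + i]'(by simp at hi; omega) := by
      rw [List.getElem_drop]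
    rw [this] at hpi
    subst hpi
    exact min_eq_right (pairwise_fst_getElem s hs hj (by simp at hi; omega) (by omega))
  conv_lhs => rw [← List.take_append_drop j s]
  rw [List.map_append, List.sum_append]
  rw [List.map_congr_left htk, List.map_congr_left hdr]
  rw [PySem.List.sum_map_const_int]
  have hlen : ((s.drop j).length : Int) = (s.length : Int) - j := by
    simp only [List.length_drop]; omega
  rw [hlen]

theorem takeWhile_length_not (p : Int → Bool) : ∀ (l : List Int)
    (h : (l.takeWhile p).length < l.length), p (l[(l.takeWhile p).length]) = false := by
  intro l
  induction l with
  | nil => intro h; simp at h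
  | cons c r ih =>
    intro h
    by_cases hc : p c
    · simp only [List.takeWhile_cons, hc, if_true, List.length_cons] at h ⊢
      simpa using ih (by omega)
    · simp only [List.takeWhile_cons, hc] at h ⊢
      simpa using hc

theorem bsearchGo_spec (ft : List Int) (k : Int) : ∀ (fuel : Nat) (lo hi : Int),
    (hi - lo).toNat ≤ fuel → costf ft lo ≤ k → ¬ costf ft hi ≤ k → lo < hi →
    costf ft (bsearchGo ft k fuel lo hi) ≤ k ∧
      ¬ costf ft (bsearchGo ft k fuel lo hi + 1) ≤ k := by
  intro fuel
  induction fuel with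
  | zero => intro lo hi hf _ _ hlt; exfalso; omega
  | succ fuel ih =>
    intro lo hi hf hlo hhi hlt
    rw [bsearchGo]
    by_cases h : lo + 1 < hi
    · rw [if_pos h]
      have he : PySem.Int.floordiv (lo + hi) 2 = (lo + hi) / 2 :=
        PySem.Int.floordiv_eq_ediv_of_pos (by norm_num)
      simp only [he]
      by_cases hc : costf ft ((lo + hi) / 2) ≤ k
      · rw [if_pos hc]
        exact ih ((lo + hi) / 2) hi (by omega) hc hhi (by omega)
      · rw [if_neg hc]
        exact ih lo ((lo + hi) / 2) (by omega) hlo hc (by omega)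
    · rw [if_neg h]
      have : hi = lo + 1 := by omega
      subst this
      exact ⟨hlo, hhi⟩

theorem bsearchB_spec (ft : List Int) (k : Int) : ∀ (lo hi : Int),
    costf ft lo ≤ k → ¬ costf ft hi ≤ k → lo < hi →
    costf ft (bsearchB ft k lo hi) ≤ k ∧ ¬ costf ft (bsearchB ft k lo hi + 1) ≤ k := by
  intro lo hi
  exact bsearchGo_spec ft k (hi - lo).toNat lo hi (le_refl _)

theorem zipIdx_pairwise_snd (l : List Int) : (l.zipIdx).Pairwise (fun a b => a.2 < b.2) := by
  rw [List.pairwise_iff_getElem]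
  intro i j hi hj hij
  simp only [List.getElem_zipIdx]
  simpa using hij

theorem solution_agree (ft : List Int) (k : Int) (hpre : Pre_solution ft k) :
    solution ft k = solution_alt ft k := by
  by_cases hsum : ft.sum ≤ k
  · simp [solution, solution_alt, hsum]
  · have hne : ft ≠ [] := by
      intro h
      subst h
      simp only [List.sum_nil] at hsum
      exact hsum (hpre rfl)
    unfold solution solution_alt
    simp only [if_neg hsum]
    rw [buildA_eq ft]
    set pairs := ft.zipIdx.map (fun x => (x.1, (x.2 : Int) + 1)) with hpairs
    set s := PySem.List.sorted2 pairs (fun x => x.1) (fun x => x.2) false with hsdef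
    have hperm : s.Perm pairs := PySem.List.sorted2_perm pairs _ _ false
    have hslen : s.length = ft.length := by
      rw [hperm.length_eq, hpairs, List.length_map, List.length_zipIdx]
    have hpair : s.Pairwise (fun a b => a.1 ≤ b.1) := by
      rw [hsdef, sorted2_as_foldl]
      exact foldl_insert_pairwise _ [] (by simp)
    set n : Int := (ft.length : Int) with hn
    have hslenZ : (s.length : Int) = n := by rw [hslen]
    -- the cost bridge: costf over ft = the same sum over the sorted pair list s
    have hcost : ∀ v, costf ft v = (s.map (fun p => min p.1 v)).sum := by
      intro v
      have h1 : (s.map (fun p => min p.1 v)).sum = (pairs.map (fun p => min p.1 v)).sum :=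
        (hperm.map _).sum_eq
      rw [h1, hpairs, List.map_map]
      have h2 : (ft.zipIdx.map (fun x : Int × Nat => min x.1 v)) = ft.map (fun t => min t v) := by
        have he : (fun x : Int × Nat => min x.1 v) = (fun t => min t v) ∘ Prod.fst := rfl
        rw [he, ← List.map_map, List.zipIdx_map_fst]
      simp only [Function.comp_def] at h2 ⊢
      rw [costf, ← h2]
    have hsum_s : (s.map Prod.fst).sum = ft.sum := by
      have h1 : (s.map Prod.fst).sum = (pairs.map Prod.fst).sum := (hperm.map _).sum_eq
      rw [h1, hpairs, List.map_map]
      have he : (Prod.fst ∘ fun x : Int × Nat => (x.1, (x.2 : Int) + 1)) = Prod.fst := rfl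
      rw [he, List.zipIdx_map_fst]
    -- rewrite A's loop by its takeWhile characterization
    have hloop := loopA_eq k s 0 n 0
    rw [show (0 : Int) + n * 0 = 0 from by ring] at hloop
    rw [hloop]
    set cs := costsL 0 n s with hcsdef
    set d := (cs.takeWhile (fun c => c ≤ k)).length with hd
    have hcl : cs.length = s.length := costsL_length s 0 n
    have hdle : d ≤ s.length := by
      rw [← hcl, hd]
      exact (List.takeWhile_prefix _).sublist.length_le
    -- each cs entry is the full layer cost of the corresponding sorted time
    have hbridge : ∀ (j : Nat) (hj : j < s.length),
        cs[j]'(by rw [hcl]; exact hj) = costf ft (s[j].1) := by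
      intro j hj
      have h2 : cs[j]'(by rw [hcl]; exact hj) =
          (costsL 0 n s)[j]'(by rw [costsL_length]; exact hj) := rfl
      rw [h2, costsL_getElem s j hj 0 n, hcost, costS_at s hpair j hj, hslenZ]
      ring
    -- entries before d are ≤ k, the entry at d is > k
    have hcs_le : ∀ (j : Nat) (hj : j < d),
        cs[j]'(by rw [hcl]; exact lt_of_lt_of_le hj hdle) ≤ k := by
      intro j hj
      have hj' : j < (cs.takeWhile (fun c => c ≤ k)).length := by
        rw [hd] at hj; exact hj
      have hpre2 : (cs.takeWhile (fun c => c ≤ k)) <+: cs := List.takeWhile_prefix _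
      have h1 : (cs.takeWhile (fun c => c ≤ k))[j]'hj' =
          cs[j]'(by rw [hcl]; exact lt_of_lt_of_le hj hdle) := hpre2.getElem _
      have h2 := List.mem_takeWhile_imp
        (List.getElem_mem (l := cs.takeWhile (fun c => c ≤ k)) (n := j) (h := hj'))
      rw [h1] at h2
      exact of_decide_eq_true h2
    have hdlt : d < s.length := by
      rcases lt_or_eq_of_le hdle with h | h
      · exact h
      · exfalso
        have hlen0 : 0 < s.length := by
          rw [hslen]; exact List.length_pos_iff.mpr hne
        have hj : s.length - 1 < s.length := by omega
        have h1 : cs[s.length - 1]'(by rw [hcl]; exact hj) ≤ k :=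
          hcs_le (s.length - 1) (by omega)
        rw [hbridge (s.length - 1) hj, hcost, costS_at s hpair (s.length - 1) hj] at h1
        -- the full layer cost at the largest time is the whole sum
        have hstep : ((s.take (s.length - 1)).map Prod.fst).sum + s[s.length - 1].1 =
            (s.map Prod.fst).sum := by
          rw [List.map_take]
          have h6 := List.sum_take_succ (s.map Prod.fst) (s.length - 1)
            (by rw [List.length_map]; exact hj)
          rw [show s.length - 1 + 1 = s.length from by omega] at h6
          rw [List.take_of_length_le (by rw [List.length_map])] at h6
          rw [h6, List.getElem_map]
        have hone : ((s.length : Int) - ((s.length - 1 : Nat) : Int)) = 1 := by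
          omega
        rw [hone, one_mul, hstep, hsum_s] at h1
        exact hsum h1
    have hcs_gt : ¬ (cs[d]'(by rw [hcl]; exact hdlt) ≤ k) := by
      have h0' := hdlt
      rw [hd] at h0'
      have h1 := takeWhile_length_not (fun c => decide (c ≤ k)) cs (by rw [hcl]; exact h0')
      have h2 : decide ((cs[d]'(by rw [hcl]; exact hdlt)) ≤ k) = false := h1
      simp only [decide_eq_false_iff_not] at h2
      exact h2
    -- binary-search bracket
    have hnpos : (0 : Int) < n := by
      rw [hn]
      exact_mod_cast List.length_pos_iff.mpr hne
    have hlo0 : costf ft (PySem.Int.floordiv k n) ≤ k := by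
      rw [hcost]
      refine le_trans (costS_le s _) ?_
      rw [hslenZ]
      have h2 := PySem.Int.floordiv_mul_add_mod k n
      have h3 := PySem.Int.mod_nonneg k hnpos
      have h4 : n * PySem.Int.floordiv k n = PySem.Int.floordiv k n * n := mul_comm _ _
      linarith
    obtain ⟨mx, hmx⟩ : ∃ mx, PySem.List.max? ft (fun x => x) = some mx := by
      cases hm0 : PySem.List.max? ft (fun x => x) with
      | none => exact absurd ((PySem.List.max?_eq_none_iff ft (fun x => x)).mp hm0) hne
      | some m => exact ⟨m, rfl⟩
    have hhi0 : ¬ costf ft ((PySem.List.max? ft (fun x => x)).getD 0) ≤ k := by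
      rw [hmx, Option.getD_some]
      have hall := PySem.List.max?_isMax hmx
      have hfx : costf ft mx = ft.sum := by
        unfold costf
        rw [List.map_congr_left (fun t ht => min_eq_left (hall t ht))]
        simp
      rw [hfx]
      exact hsum
    have hlohi : PySem.Int.floordiv k n < (PySem.List.max? ft (fun x => x)).getD 0 := by
      by_contra hcon
      push Not at hcon
      have hm := costS_mono s hcon
      rw [← hcost, ← hcost] at hm
      exact hhi0 (le_trans hm hlo0)
    obtain ⟨hv1, hv2⟩ := bsearchB_spec ft k (PySem.Int.floordiv k n)
      ((PySem.List.max? ft (fun x => x)).getD 0) hlo0 hhi0 hlohi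
    set v := bsearchB ft k (PySem.Int.floordiv k n)
      ((PySem.List.max? ft (fun x => x)).getD 0) with hvdef
    -- foods popped by A have time ≤ v, the survivors have time > v
    have htake : ∀ p ∈ s.take d, p.1 ≤ v := by
      intro p hp
      obtain ⟨j, hjlen, hpj⟩ := List.getElem_of_mem hp
      have hjd : j < d := by simp only [List.length_take] at hjlen; omega
      have hjs : j < s.length := by omega
      have hpj' : p = s[j] := by rw [← hpj, List.getElem_take]
      by_contra hgt
      push Not at hgt
      have h1 : costf ft (v + 1) ≤ costf ft (s[j].1) := by
        rw [hcost, hcost]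
        exact costS_mono s (by rw [← hpj']; omega)
      have h2 := hcs_le j hjd
      rw [hbridge j hjs] at h2
      exact hv2 (le_trans h1 h2)
    have hnext : v < s[d].1 := by
      by_contra hcon
      push Not at hcon
      have h1 : costf ft (s[d].1) ≤ costf ft v := by
        rw [hcost, hcost]; exact costS_mono s hcon
      rw [← hbridge d hdlt] at h1
      exact hcs_gt (le_trans h1 hv1)
    have hdrop : ∀ p ∈ s.drop d, v < p.1 := by
      intro p hp
      obtain ⟨i, hi, hpi⟩ := List.getElem_of_mem hp
      have hi' : d + i < s.length := by simp only [List.length_drop] at hi; omega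
      have hgi : (s.drop d)[i] = s[d + i]'hi' := by rw [List.getElem_drop]
      rw [hgi] at hpi
      have hmono := pairwise_fst_getElem s hpair hdlt hi' (Nat.le_add_right d i)
      rw [hpi] at hmono
      exact lt_of_lt_of_le hnext hmono
    -- survivors coincide (same set of indices, both listed in increasing index order)
    have hB : ((PySem.List.enumerate ft 0).filter (fun x => decide (v < x.2))).map
          (fun x => x.1 + 1)
        = (pairs.filter (fun p => decide (v < p.1))).map Prod.snd := by
      rw [PySem.List.enumerate_eq_zipIdx_map, hpairs]
      rw [List.filter_map, List.filter_map, List.map_map, List.map_map]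
      simp [Function.comp_def]
    have hP : (pairs.filter (fun p => decide (v < p.1))).Perm (s.drop d) := by
      have h1 := (hperm.filter (fun p => decide (v < p.1))).symm
      have h2 : s.filter (fun p => decide (v < p.1)) = s.drop d := by
        conv_lhs => rw [← List.take_append_drop d s]
        rw [List.filter_append,
            List.filter_eq_nil_iff.mpr (fun a ha hlt => by
              have := htake a ha
              simp only [decide_eq_true_eq] at hlt
              omega),
            List.filter_eq_self.mpr (fun a ha => by
              simpa using hdrop a ha),
            List.nil_append]
      rw [h2] at h1
      exact h1
    have hPW : ((pairs.filter (fun p => decide (v < p.1))).map Prod.snd).Pairwise (· ≤ ·) := by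
      rw [hpairs, List.filter_map, List.map_map]
      refine List.Pairwise.map _ ?_ ((zipIdx_pairwise_snd ft).filter _)
      intro a b hab
      simp only [Function.comp_apply]
      omega
    have hsurv : ((PySem.List.enumerate ft 0).filter (fun x => decide (v < x.2))).map
          (fun x => x.1 + 1)
        = (PySem.List.sorted (s.drop d) (fun x => x.2) false).map Prod.snd := by
      rw [sorted_map_snd, hB]
      exact (PySem.List.sorted_id_eq_of_perm_of_pairwise _ _
        (hP.map Prod.snd) hPW).symm
    -- modulus and index agree
    have hlenB : ((((PySem.List.enumerate ft 0).filter (fun x => decide (v < x.2))).map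
        (fun x => x.1 + 1)).length : Int) = n - (d : Int) := by
      rw [hsurv, List.length_map, PySem.List.length_sorted, List.length_drop]
      rw [← hslenZ]
      exact Nat.cast_sub hdle
    have hsumv : ((cs.take d).getLastD 0) = if d = 0 then 0 else cs.getD (d - 1) 0 :=
      take_getLastD cs d 0 (by rw [hcl]; exact hdle)
    have hcv : ∃ c : Int, costf ft v =
        (if d = 0 then 0 else cs.getD (d - 1) 0) + (n - (d : Int)) * c := by
      have hsplit : costf ft v = ((s.take d).map Prod.fst).sum + ((s.length : Int) - d) * v := by
        rw [hcost]
        conv_lhs => rw [← List.take_append_drop d s]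
        rw [List.map_append, List.sum_append,
            List.map_congr_left (fun p hp => min_eq_left (htake p hp)),
            List.map_congr_left (fun p hp => min_eq_right (le_of_lt (hdrop p hp))),
            PySem.List.sum_map_const_int]
        have h7 : (((s.drop d).length : Int)) = (s.length : Int) - d := by
          rw [List.length_drop]; push_cast [hdle]; omega
        rw [h7]
      rcases Nat.eq_zero_or_pos d with h0 | hposd
      · refine ⟨v, ?_⟩
        rw [hsplit, h0]
        simp [hslenZ]
      · refine ⟨v - (s[d - 1]'(by omega)).1, ?_⟩
        rw [hsplit, if_neg (by omega)]
        rw [List.getD_eq_getElem cs 0 (by rw [hcl]; omega)]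
        have hcg : cs[d - 1]'(by rw [hcl]; omega) =
            (costsL 0 n s)[d - 1]'(by rw [costsL_length]; omega) := rfl
        rw [hcg, costsL_getElem s (d - 1) (by omega) 0 n]
        have hstep : ((s.take d).map Prod.fst).sum =
            ((s.take (d - 1)).map Prod.fst).sum + (s[d - 1]'(by omega)).1 := by
          rw [List.map_take, List.map_take]
          have h6 := List.sum_take_succ (s.map Prod.fst) (d - 1)
            (by rw [List.length_map]; omega)
          rw [show d - 1 + 1 = d from by omega] at h6
          rw [h6, List.getElem_map]
        rw [hstep, hslenZ]
        have hcast : ((d - 1 : Nat) : Int) = (d : Int) - 1 := by push_cast [hposd]; omega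
        rw [hcast]
        ring
    obtain ⟨c, hc⟩ := hcv
    have hLpos : (0 : Int) < n - (d : Int) := by
      rw [← hslenZ]; omega
    have hidx : PySem.Int.mod (k - costf ft v) (n - (d : Int)) =
        PySem.Int.mod (k - (if d = 0 then 0 else cs.getD (d - 1) 0)) (n - (d : Int)) := by
      rw [PySem.Int.mod_eq_emod_of_pos hLpos, PySem.Int.mod_eq_emod_of_pos hLpos, hc]
      rw [show k - ((if d = 0 then 0 else cs.getD (d - 1) 0) + (n - (d : Int)) * c) =
          (k - (if d = 0 then 0 else cs.getD (d - 1) 0)) + (n - (d : Int)) * (-c) from by ring]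
      rw [Int.add_mul_emod_self_left]
    -- assemble
    dsimp only
    rw [hlenB, hidx, hsurv, hsumv, pyGet?_map_snd]

-- ===== VERDICT (by name: the statement is the Claim_ definition above) =====
theorem solution_spec : Claim_equal_solution := by
  intro ft k _ hpre
  unfold Spec_solution
  exact solution_agree ft k hpre
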